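-- pv_equiv track=rewrite | github.com/MaciejKlepacki/ASD | part_1/Zadania offline/offline1/zad1.py | strong_string
-- ===== SOURCE A (Python) =====
-- def strong_string(T):
--     if len(T) == 0:
--         return 0
--     T = merge_sort(T)
--     final_force = 1
--     while len(T) != 0:
--         force = 1
--         acc = T[0]
--         T.pop(0)
--         while len(T) > 0 and T[0] == acc:
--             force += 1
--             T.pop(0)
--         acc = acc[::-1]
--         i = binary_search_first(T, acc)
--         while i != -1 and i < len(T) and T[i] == acc:
--             force += 1
--             T.pop(i)
--             i = binary_search_first(T, acc)
--         if force > final_force: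
--             final_force = force
--     return final_force
--
-- def binary_search_first(T, x):
--     left, right = 0, len(T) - 1
--     result = -1
--     while left <= right:
--         mid = (left + right) // 2
--         if T[mid] == x:
--             result = mid
--             right = mid - 1  # Continue searching in the left half
--         elif T[mid] < x:
--             left = mid + 1
--         else:
--             right = mid - 1
--     return result
--
-- def merge_sort(T):
--     if len(T) > 1:
--         mid = len(T) // 2
--         left_half = T[:mid]
--         right_half = T[mid:]
--
--         merge_sort(left_half)
--         merge_sort(right_half)
--
--         i = j = k = 0
--
--         while i < len(left_half) and j < len(right_half):
--             if left_half[i] < right_half[j]: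
--                 T[k] = left_half[i]
--                 i += 1
--             else:
--                 T[k] = right_half[j]
--                 j += 1
--             k += 1
--
--         while i < len(left_half):
--             T[k] = left_half[i]
--             i += 1
--             k += 1
--
--         while j < len(right_half):
--             T[k] = right_half[j]
--             j += 1
--             k += 1
--
--     return T
-- ===== SOURCE B (Python) =====
-- def strong_string(T):
--     # NOTE: equivalence is about the return value only; A sorts its argument in place, B does not mutate it.
--     if len(T) == 0:
--         return 0
--     cnt = {}
--     for s in T:
--         cnt[s] = cnt.get(s, 0) + 1
--     best = 1
--     for s, c in cnt.items():
--         r = s[::-1]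
--         total = c if r == s else c + cnt.get(r, 0)
--         if total > best:
--             best = total
--     return best
-- ===== Notes on version B (the rewrite author's own statement) =====
-- stated objective: faster
-- what changed: A merge-sorts the list, then repeatedly strips the leading group and binary-searches-and-pops every occurrence of the reversed string; B builds one hash-map counter in a single pass and takes the max of cnt[s]+cnt[reverse(s)] (palindromes counted once) over the distinct strings, with no sorting, no binary search and no list popping.
import Mathlib
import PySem

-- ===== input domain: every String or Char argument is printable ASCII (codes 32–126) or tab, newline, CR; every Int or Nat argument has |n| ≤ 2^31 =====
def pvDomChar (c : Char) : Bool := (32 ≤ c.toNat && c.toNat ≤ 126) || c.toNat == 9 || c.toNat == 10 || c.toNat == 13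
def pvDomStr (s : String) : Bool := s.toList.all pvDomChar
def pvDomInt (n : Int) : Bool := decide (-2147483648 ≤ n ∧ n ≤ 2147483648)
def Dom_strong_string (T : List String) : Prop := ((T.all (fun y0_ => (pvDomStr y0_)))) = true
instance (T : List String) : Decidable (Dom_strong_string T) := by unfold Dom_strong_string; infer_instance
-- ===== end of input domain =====

-- B replaces A's sort + group-strip + binary-search-pop scan by a single counter pass (faster; asymptotic
-- in a timing run). Equivalence is about the RETURN value only: A sorts its argument list in place, B does not mutate it.


-- s[::-1]  (Python reverse slice; slice? with step -1 is total, so getD never fires its default)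
def pvRev (s : String) : String := (PySem.Str.slice? s none none (-1)).getD ""

-- ===== PORT A =====
-- A's loops are transcribed with a structural fuel parameter bounding the iteration count (the wrappers
-- supply enough fuel, so the fuel-exhausted arms are never reached on any input).
-- merge_sort's merge phase: the three while loops of A, the i/j pointers becoming recursion on the two lists
def pvMergeF : Nat → List String → List String → List String
  | _, [], r => r
  | _, a :: l', [] => a :: l'
  | 0, _ :: _, _ :: _ => []   -- unreachable: fuel covers both lists
  | n + 1, a :: l', b :: r' =>
    if a < b then a :: pvMergeF n l' (b :: r') else b :: pvMergeF n (a :: l') r'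

def pvMerge (l r : List String) : List String := pvMergeF (l.length + r.length) l r

-- merge_sort: len(T)//2 on a Nat length is Nat division; T[:mid]/T[mid:] are take/drop (PySem.List.slice_to_natCast/slice_from_natCast)
def pvMergeSortF : Nat → List String → List String
  | 0, T => T   -- unreachable for length > 1: fuel covers the recursion depth
  | n + 1, T =>
    if 1 < T.length then
      pvMerge (pvMergeSortF n (T.take (T.length / 2))) (pvMergeSortF n (T.drop (T.length / 2)))
    else T

def pvMergeSort (T : List String) : List String := pvMergeSortF T.length T

-- binary_search_first's while loop (left/right/result as parameters; the interval shrinks each pass)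
def pvBsLoopF (T : List String) (x : String) : Nat → Int → Int → Int → Int
  | 0, _, _, result => result   -- unreachable: fuel covers the interval width
  | n + 1, left, right, result =>
    if left ≤ right then
      let mid := PySem.Int.floordiv (left + right) 2
      match PySem.List.pyGet? T mid with
      | none => result   -- unreachable: Python's T[mid] never raises here (0 ≤ left and right < len are invariant)
      | some v =>
        if v = x then pvBsLoopF T x n left (mid - 1) mid
        else if v < x then pvBsLoopF T x n (mid + 1) right result
        else pvBsLoopF T x n left (mid - 1) result
    else result

def pvBsearchFirst (T : List String) (x : String) : Int :=
  pvBsLoopF T x T.length 0 (T.length - 1) (-1)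

-- inner while 1: "while len(T) > 0 and T[0] == acc: force += 1; T.pop(0)"
def pvTakeEq (T : List String) (acc : String) (force : Int) : Int × List String :=
  match T with
  | [] => (force, [])
  | b :: rest => if b = acc then pvTakeEq rest acc (force + 1) else (force, b :: rest)

-- inner while 2: "i = bsearch; while i != -1 and i < len(T) and T[i] == acc: force += 1; T.pop(i); i = bsearch"
def pvPopLoopF (acc : String) : Nat → List String → Int → Int × List String
  | 0, T, force => (force, T)   -- unreachable: fuel exceeds the list length, each pass pops one element
  | n + 1, T, force =>
    let i := pvBsearchFirst T acc
    if i ≠ -1 ∧ i < (T.length : Int) ∧ PySem.List.pyGet? T i = some acc then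
      match PySem.List.pop? T i with
      | some r => pvPopLoopF acc n r.2 (force + 1)
      | none => (force, T)   -- unreachable: the guard checked T[i] exists
    else (force, T)

def pvPopLoop (T : List String) (acc : String) (force : Int) : Int × List String :=
  pvPopLoopF acc (T.length + 1) T force

-- outer while loop of strong_string (each pass removes at least the head)
def pvOuterLoopF : Nat → List String → Int → Int
  | 0, _, final_force => final_force   -- unreachable for a nonempty list: fuel covers the length
  | n + 1, T, final_force =>
    match T with
    | [] => final_force
    | a :: rest =>
      let r1 := pvTakeEq rest a 1
      let acc := pvRev a
      let r2 := pvPopLoop r1.2 acc r1.1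
      pvOuterLoopF n r2.2 (if r2.1 > final_force then r2.1 else final_force)

def strong_string (T : List String) : Int :=
  if T.length = 0 then 0 else pvOuterLoopF T.length (pvMergeSort T) 1

-- ===== PORT B =====
def strong_string_alt (T : List String) : Int :=
  if T.length = 0 then 0
  else
    let cnt := T.foldl (fun d s => d.insert s (d.getD s 0 + 1)) (PySem.Dict.empty : PySem.Dict String Int)
    cnt.items.foldl (fun best p =>
      let r := pvRev p.1
      let total := if r = p.1 then p.2 else p.2 + cnt.getD r 0
      if total > best then total else best) 1

-- ===== PRECONDITION & SPEC =====
def Spec_strong_string (T : List String) (out : Int) : Prop := out = strong_string_alt T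
instance (T : List String) (out : Int) : Decidable (Spec_strong_string T out) := by unfold Spec_strong_string; infer_instance

-- ===== CLAIM (what is proved, stated in full; the proofs are below) =====
def Claim_equal_strong_string : Prop := ∀ (T : List String), Dom_strong_string T → Spec_strong_string T (strong_string T)

-- ===== LEMMAS AND PROOFS =====

theorem pvRev_eq (s : String) : pvRev s = String.ofList s.toList.reverse := by
  simp [pvRev, PySem.Str.slice?_none_none_neg_one]

theorem pvRev_pvRev (s : String) : pvRev (pvRev s) = s := by
  simp [pvRev_eq]

theorem pvRev_inj {s t : String} (h : pvRev s = pvRev t) : s = t := by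
  rw [← pvRev_pvRev s, h, pvRev_pvRev]

-- the quantity both programs maximise: count of s plus (for non-palindromes) count of its reverse
def pvF (L : List String) (s : String) : Int :=
  if pvRev s = s then (L.count s : Int) else (L.count s : Int) + (L.count (pvRev s) : Int)

def pvMx (g : String → Int) (init : Int) (l : List String) : Int :=
  l.foldl (fun b s => max b (g s)) init

theorem le_pvMx (g : String → Int) (init : Int) (l : List String) :
    init ≤ pvMx g init l ∧ ∀ s ∈ l, g s ≤ pvMx g init l :=
  PySem.List.le_foldl_max_int l g init

theorem pvMx_le {g : String → Int} {c init : Int} {l : List String}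
    (h1 : init ≤ c) (h2 : ∀ s ∈ l, g s ≤ c) : pvMx g init l ≤ c := by
  induction l generalizing init with
  | nil => exact h1
  | cons a l ih =>
    exact ih (max_le h1 (h2 a (by simp))) (fun s hs => h2 s (by simp [hs]))

theorem pvMx_congr {g₁ g₂ : String → Int} {init : Int} {l : List String}
    (h : ∀ s ∈ l, g₁ s = g₂ s) : pvMx g₁ init l = pvMx g₂ init l :=
  List.foldl_ext _ _ init (fun b s hs => by rw [h s hs])

theorem pvMx_eq_of_mem_iff {g : String → Int} {init : Int} {l₁ l₂ : List String}
    (h : ∀ s, s ∈ l₁ ↔ s ∈ l₂) : pvMx g init l₁ = pvMx g init l₂ := by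
  have A := le_pvMx g init l₁; have B := le_pvMx g init l₂
  exact le_antisymm (pvMx_le B.1 fun s hs => B.2 s ((h s).1 hs))
                    (pvMx_le A.1 fun s hs => A.2 s ((h s).2 hs))

theorem pvF_rev (L : List String) (a : String) : pvF L (pvRev a) = pvF L a := by
  by_cases h : pvRev a = a
  · rw [h]
  · have h2 : pvRev (pvRev a) = a := pvRev_pvRev a
    simp only [pvF, h2, if_neg h, if_neg (fun he : a = pvRev a => h he.symm)]
    omega

theorem pvMergeF_perm : ∀ (n : Nat) (l r : List String), l.length + r.length ≤ n →
    (pvMergeF n l r).Perm (l ++ r) := by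
  intro n
  induction n with
  | zero =>
    intro l r h
    cases l with
    | nil => simp [pvMergeF]
    | cons a l' => cases r with
      | nil => simp [pvMergeF]
      | cons b r' => simp at h
  | succ n ih =>
    intro l r h
    cases l with
    | nil => simp [pvMergeF]
    | cons a l' =>
      cases r with
      | nil => simp [pvMergeF]
      | cons b r' =>
        rw [pvMergeF]
        split
        · exact (ih l' (b :: r') (by simp only [List.length_cons] at h ⊢; omega)).cons a
        · exact ((ih (a :: l') r' (by simp only [List.length_cons] at h ⊢; omega)).cons b).trans
            (List.perm_middle (a := b) (l₁ := a :: l') (l₂ := r')).symm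

theorem pvMerge_perm (l r : List String) : (pvMerge l r).Perm (l ++ r) :=
  pvMergeF_perm _ l r le_rfl

theorem mem_pvMergeF {n : Nat} {l r : List String} (hn : l.length + r.length ≤ n) {y : String}
    (h : y ∈ pvMergeF n l r) : y ∈ l ∨ y ∈ r := by
  have := (pvMergeF_perm n l r hn).mem_iff.mp h
  simpa using this

theorem pvMergeF_sorted : ∀ (n : Nat) (l r : List String), l.length + r.length ≤ n →
    l.Pairwise (· ≤ ·) → r.Pairwise (· ≤ ·) → (pvMergeF n l r).Pairwise (· ≤ ·) := by
  intro n
  induction n with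
  | zero =>
    intro l r h hl hr
    cases l with
    | nil => rw [pvMergeF.eq_1]; exact hr
    | cons a l' => cases r with
      | nil => rw [pvMergeF.eq_2]; exact hl
      | cons b r' => simp at h
  | succ n ih =>
    intro l r h hl hr
    cases l with
    | nil => rw [pvMergeF.eq_1]; exact hr
    | cons a l' =>
      cases r with
      | nil => rw [pvMergeF.eq_2]; exact hl
      | cons b r' =>
        rw [pvMergeF]
        obtain ⟨hal, hl'⟩ := List.pairwise_cons.mp hl
        obtain ⟨hbr, hr'⟩ := List.pairwise_cons.mp hr
        have hb1 : l'.length + (b :: r').length ≤ n := by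
          simp only [List.length_cons] at h ⊢; omega
        have hb2 : (a :: l').length + r'.length ≤ n := by
          simp only [List.length_cons] at h ⊢; omega
        split
        · next hab =>
          refine List.pairwise_cons.mpr ⟨?_, ih l' (b :: r') hb1 hl' hr⟩
          intro y hy
          rcases mem_pvMergeF hb1 hy with h' | h'
          · exact hal y h'
          · rcases List.mem_cons.mp h' with rfl | h''
            · exact le_of_lt hab
            · exact le_trans (le_of_lt hab) (hbr y h'')
        · next hab =>
          have hba : b ≤ a := le_of_not_gt hab
          refine List.pairwise_cons.mpr ⟨?_, ih (a :: l') r' hb2 hl hr'⟩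
          intro y hy
          rcases mem_pvMergeF hb2 hy with h' | h'
          · rcases List.mem_cons.mp h' with rfl | h''
            · exact hba
            · exact le_trans hba (hal y h'')
          · exact hbr y h'

theorem pvMergeSortF_perm : ∀ (n : Nat) (T : List String), T.length ≤ n →
    (pvMergeSortF n T).Perm T := by
  intro n
  induction n with
  | zero => intro T h; rw [pvMergeSortF]
  | succ n ih =>
    intro T h
    rw [pvMergeSortF]
    split
    · next h1 =>
      have hm := List.length_take_le (T.length / 2) T
      have p1 := ih (T.take (T.length / 2)) (by simp only [List.length_take]; omega)
      have p2 := ih (T.drop (T.length / 2)) (by simp only [List.length_drop]; omega)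
      exact (pvMerge_perm _ _).trans ((p1.append p2).trans (by rw [List.take_append_drop]))
    · exact List.Perm.refl _

theorem pvMergeSort_perm (T : List String) : (pvMergeSort T).Perm T :=
  pvMergeSortF_perm _ T le_rfl

theorem pvMergeSortF_sorted : ∀ (n : Nat) (T : List String), T.length ≤ n →
    (pvMergeSortF n T).Pairwise (· ≤ ·) := by
  intro n
  induction n with
  | zero =>
    intro T h
    have hT : T = [] := List.length_eq_zero_iff.mp (by omega)
    subst hT
    rw [pvMergeSortF]
    exact List.Pairwise.nil
  | succ n ih =>
    intro T h
    rw [pvMergeSortF]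
    split
    · next h1 =>
      have hperm1 := pvMergeSortF_perm n (T.take (T.length / 2))
        (by simp only [List.length_take]; omega)
      have hperm2 := pvMergeSortF_perm n (T.drop (T.length / 2))
        (by simp only [List.length_drop]; omega)
      refine pvMergeF_sorted _ _ _ ?_ (ih _ (by simp only [List.length_take]; omega))
        (ih _ (by simp only [List.length_drop]; omega))
      rw [hperm1.length_eq, hperm2.length_eq]
    · next h1 =>
      cases T with
      | nil => exact List.Pairwise.nil
      | cons a t =>
        have ht : t = [] := by
          cases t with
          | nil => rfl
          | cons b t' => simp at h1
        subst ht
        simp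

theorem pvMergeSort_sorted (T : List String) : (pvMergeSort T).Pairwise (· ≤ ·) :=
  pvMergeSortF_sorted _ T le_rfl

theorem sorted_getElem_mono {L : List String} (h : L.Pairwise (· ≤ ·)) {i j : Nat}
    (hij : i ≤ j) (hj : j < L.length) : L[i]'(Nat.lt_of_le_of_lt hij hj) ≤ L[j] := by
  rcases Nat.lt_or_eq_of_le hij with hlt | heq
  · exact List.pairwise_iff_getElem.mp h i j _ hj hlt
  · subst heq; exact le_refl _

theorem pvBsLoopF_spec (L : List String) (x : String) :
    ∀ n (left right res : Int), (right + 1 - left).toNat ≤ n →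
    L.Pairwise (· ≤ ·) → 0 ≤ left → right < (L.length : Int) →
    (res = -1 ∨ (0 ≤ res ∧ res < (L.length : Int) ∧ PySem.List.pyGet? L res = some x)) →
    (pvBsLoopF L x n left right res = -1 ∨
      (0 ≤ pvBsLoopF L x n left right res ∧ pvBsLoopF L x n left right res < (L.length : Int) ∧
        PySem.List.pyGet? L (pvBsLoopF L x n left right res) = some x)) ∧
    (((∃ i : Nat, left ≤ (i : Int) ∧ (i : Int) ≤ right ∧ L[i]? = some x) ∨ res ≠ -1) →
      pvBsLoopF L x n left right res ≠ -1) := by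
  intro n
  induction n with
  | zero =>
    intro left right res hn hsort hl hr hres
    rw [pvBsLoopF]
    refine ⟨hres, fun hc => ?_⟩
    rcases hc with ⟨i, hi1, hi2, _⟩ | hne
    · omega
    · rcases hres with h' | h'
      · exact absurd h' hne
      · omega
  | succ n ih =>
    intro left right res hn hsort hl hr hres
    rw [pvBsLoopF]
    split
    · next hle =>
      have hmid := PySem.Int.floordiv_two_mid_bounds hle
      have h0 : 0 ≤ PySem.Int.floordiv (left + right) 2 := le_trans hl hmid.1
      have hlen : PySem.Int.floordiv (left + right) 2 < (L.length : Int) := lt_of_le_of_lt hmid.2 hr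
      have hmn : (PySem.Int.floordiv (left + right) 2).toNat < L.length := by omega
      have hget0 : PySem.List.pyGet? L (PySem.Int.floordiv (left + right) 2) =
          L[(PySem.Int.floordiv (left + right) 2).toNat]? := by
        conv_lhs => rw [show PySem.Int.floordiv (left + right) 2 =
            (((PySem.Int.floordiv (left + right) 2).toNat : Nat) : Int) by omega]
        rw [PySem.List.pyGet?_natCast]
      have hget : PySem.List.pyGet? L (PySem.Int.floordiv (left + right) 2) =
          some (L[(PySem.Int.floordiv (left + right) 2).toNat]'hmn) := by
        rw [hget0, List.getElem?_eq_getElem hmn]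
      simp only [hget]
      split
      · next hvx =>
        have hrec := ih left (PySem.Int.floordiv (left + right) 2 - 1)
          (PySem.Int.floordiv (left + right) 2) (by omega) hsort hl (by omega)
          (Or.inr ⟨h0, hlen, by rw [hget, hvx]⟩)
        exact ⟨hrec.1, fun _ => hrec.2 (Or.inr (by omega))⟩
      · split
        · next hvx hvlt =>
          have hrec := ih (PySem.Int.floordiv (left + right) 2 + 1) right res (by omega)
            hsort (by omega) hr hres
          refine ⟨hrec.1, fun hc => hrec.2 ?_⟩
          rcases hc with ⟨i, hi1, hi2, hix⟩ | hne
          · refine Or.inl ⟨i, ?_, hi2, hix⟩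
            by_contra hcon
            have hilen : i < L.length := (List.getElem?_eq_some_iff.mp hix).1
            have hix' : L[i] = x := (List.getElem?_eq_some_iff.mp hix).2
            have hmono := sorted_getElem_mono hsort (i := i)
              (j := (PySem.Int.floordiv (left + right) 2).toNat) (by omega) hmn
            rw [hix'] at hmono
            exact absurd (lt_of_le_of_lt hmono hvlt) (lt_irrefl x)
          · exact Or.inr hne
        · next hvx hvnlt =>
          have hxv : x < L[(PySem.Int.floordiv (left + right) 2).toNat] :=
            lt_of_le_of_ne (le_of_not_gt hvnlt) (fun he => hvx he.symm)
          have hrec := ih left (PySem.Int.floordiv (left + right) 2 - 1) res (by omega)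
            hsort hl (by omega) hres
          refine ⟨hrec.1, fun hc => hrec.2 ?_⟩
          rcases hc with ⟨i, hi1, hi2, hix⟩ | hne
          · refine Or.inl ⟨i, hi1, ?_, hix⟩
            by_contra hcon
            have hilen : i < L.length := (List.getElem?_eq_some_iff.mp hix).1
            have hix' : L[i] = x := (List.getElem?_eq_some_iff.mp hix).2
            have hmono := sorted_getElem_mono hsort
              (i := (PySem.Int.floordiv (left + right) 2).toNat) (j := i) (by omega) hilen
            rw [hix'] at hmono
            exact absurd (lt_of_lt_of_le hxv hmono) (lt_irrefl x)
          · exact Or.inr hne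
    · next hle =>
      refine ⟨hres, fun hc => ?_⟩
      rcases hc with ⟨i, hi1, hi2, _⟩ | hne
      · omega
      · rcases hres with h' | h'
        · exact absurd h' hne
        · omega

theorem pvBsearchFirst_spec (L : List String) (x : String) (hs : L.Pairwise (· ≤ ·)) :
    (pvBsearchFirst L x = -1 → x ∉ L) ∧
    (pvBsearchFirst L x ≠ -1 → 0 ≤ pvBsearchFirst L x ∧ pvBsearchFirst L x < (L.length : Int) ∧
      PySem.List.pyGet? L (pvBsearchFirst L x) = some x) := by
  have h := pvBsLoopF_spec L x L.length 0 ((L.length : Int) - 1) (-1) (by omega) hs (le_refl 0)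
    (by omega) (Or.inl rfl)
  unfold pvBsearchFirst
  constructor
  · intro h1 hmem
    obtain ⟨i, hi, hix⟩ := List.getElem_of_mem hmem
    exact (h.2 (Or.inl ⟨i, by omega, by omega, by rw [List.getElem?_eq_getElem hi, hix]⟩)) h1
  · intro h1
    rcases h.1 with h' | h'
    · exact absurd h' h1
    · exact h'

theorem pvPopLoopF_spec :
    ∀ n (L : List String), L.length < n → L.Pairwise (· ≤ ·) → ∀ (x : String) (f : Int),
      pvPopLoopF x n L f = (f + (L.count x : Int), L.filter (fun s => s ≠ x)) := by
  intro n
  induction n with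
  | zero => intro L hn; exact absurd hn (Nat.not_lt_zero _)
  | succ n ih =>
  intro L hn hs x f
  rw [pvPopLoopF]
  by_cases hmem : x ∈ L
  · have hne : pvBsearchFirst L x ≠ -1 := by
      intro h; exact (pvBsearchFirst_spec L x hs).1 h hmem
    obtain ⟨h0, hlen, hget⟩ := (pvBsearchFirst_spec L x hs).2 hne
    rw [if_pos ⟨hne, hlen, hget⟩]
    have hj : (pvBsearchFirst L x).toNat < L.length := by omega
    have hcast : pvBsearchFirst L x = (((pvBsearchFirst L x).toNat : Nat) : Int) := by omega
    rw [hcast, PySem.List.pop?_natCast L _ hj]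
    have hLx : L[(pvBsearchFirst L x).toNat] = x := by
      rw [hcast, PySem.List.pyGet?_natCast, List.getElem?_eq_getElem hj] at hget
      exact Option.some.inj hget
    set j := (pvBsearchFirst L x).toNat with hjdef
    split
    case h_2 heq => exact absurd heq (by simp)
    case h_1 r hp =>
    have hr : r = (L[j]'hj, L.eraseIdx j) := (Option.some.inj hp).symm
    subst hr
    have herase : L.eraseIdx j = L.take j ++ L.drop (j + 1) := List.eraseIdx_eq_take_drop_succ L j
    have hdecomp : L = L.take j ++ L[j] :: L.drop (j + 1) := by
      conv_lhs => rw [← List.take_append_drop j L]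
      rw [List.drop_eq_getElem_cons hj]
    have hlerase : (L.eraseIdx j).length < n := by
      rw [List.length_eraseIdx_of_lt hj]; omega
    have hserase : (L.eraseIdx j).Pairwise (· ≤ ·) :=
      List.Pairwise.sublist (List.eraseIdx_sublist L j) hs
    show pvPopLoopF x n (L.eraseIdx j) (f + 1) = _
    rw [ih (L.eraseIdx j) hlerase hserase x (f + 1)]
    have hcount : L.count x = (L.eraseIdx j).count x + 1 := by
      conv_lhs => rw [hdecomp]
      rw [herase, List.count_append, List.count_append, hLx, List.count_cons_self]
      omega
    have hfilter : (L.eraseIdx j).filter (fun s => s ≠ x) = L.filter (fun s => s ≠ x) := by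
      conv_rhs => rw [hdecomp]
      rw [herase, List.filter_append, List.filter_append, List.filter_cons, hLx]
      simp
    rw [hfilter]
    simp only [Prod.mk.injEq]
    refine ⟨?_, trivial⟩
    rw [hcount]
    push_cast
    ring
  · have hne : pvBsearchFirst L x = -1 := by
      by_contra h
      obtain ⟨h0, hlen, hget⟩ := (pvBsearchFirst_spec L x hs).2 h
      have hj : (pvBsearchFirst L x).toNat < L.length := by omega
      rw [show pvBsearchFirst L x = (((pvBsearchFirst L x).toNat : Nat) : Int) by omega,
        PySem.List.pyGet?_natCast, List.getElem?_eq_getElem hj] at hget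
      exact hmem (Option.some.inj hget ▸ List.getElem_mem hj)
    rw [if_neg (by simp [hne])]
    have hc : L.count x = 0 := List.count_eq_zero.mpr hmem
    have hf : L.filter (fun s => s ≠ x) = L :=
      List.filter_eq_self.mpr (fun a ha => by simp; intro he; exact hmem (he ▸ ha))
    rw [hc, hf]
    simp

theorem pvPopLoop_spec (L : List String) (hs : L.Pairwise (· ≤ ·)) (x : String) (f : Int) :
    pvPopLoop L x f = (f + (L.count x : Int), L.filter (fun s => s ≠ x)) :=
  pvPopLoopF_spec (L.length + 1) L (by omega) hs x f

theorem pvTakeEq_spec :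
    ∀ (rest : List String) (a : String) (f : Int), (a :: rest).Pairwise (· ≤ ·) →
      pvTakeEq rest a f = (f + (rest.count a : Int), rest.filter (fun s => s ≠ a)) := by
  intro rest
  induction rest with
  | nil => intro a f _; simp [pvTakeEq]
  | cons c rest' ih =>
    intro a f hs
    obtain ⟨hac, hcr⟩ := List.pairwise_cons.mp hs
    rw [pvTakeEq]
    by_cases hca : c = a
    · subst hca
      rw [if_pos rfl]
      rw [ih c (f + 1) hcr]
      simp only [Prod.mk.injEq]
      refine ⟨by rw [List.count_cons_self]; push_cast; ring, by simp⟩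
    · rw [if_neg hca]
      have hlt : a < c := lt_of_le_of_ne (hac c (by simp)) (fun he => hca he.symm)
      obtain ⟨hcr', _⟩ := List.pairwise_cons.mp hcr
      have hnmem : a ∉ c :: rest' := by
        intro hm
        rcases List.mem_cons.mp hm with rfl | hm'
        · exact absurd hlt (lt_irrefl a)
        · exact absurd (lt_of_lt_of_le hlt (hcr' a hm')) (lt_irrefl a)
      rw [List.count_eq_zero.mpr hnmem]
      rw [List.filter_eq_self.mpr (fun s hsm => by
        simp; intro he; exact hnmem (he ▸ hsm))]
      simp

theorem pvOuterLoopF_spec :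
    ∀ n (L : List String), L.length ≤ n → L.Pairwise (· ≤ ·) → ∀ ff : Int,
      pvOuterLoopF n L ff = pvMx (pvF L) ff L := by
  intro n
  induction n with
  | zero =>
    intro L hn _ ff
    have hL : L = [] := List.length_eq_zero_iff.mp (by omega)
    subst hL
    rw [pvOuterLoopF]
    simp [pvMx]
  | succ n ih =>
  intro L hn hs ff
  cases L with
  | nil => rw [pvOuterLoopF]; simp [pvMx]
  | cons a rest =>
    rw [pvOuterLoopF]
    simp only [pvTakeEq_spec rest a 1 hs]
    have hsL1 : (rest.filter (fun s => s ≠ a)).Pairwise (· ≤ ·) :=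
      List.Pairwise.sublist (List.Sublist.trans List.filter_sublist (List.sublist_cons_self a rest)) hs
    simp only [pvPopLoop_spec _ hsL1 (pvRev a)]
    set acc := pvRev a with hacc
    set L1 := rest.filter (fun s => decide (s ≠ a)) with hL1
    set L2 := L1.filter (fun s => decide (s ≠ acc)) with hL2
    set v : Int := 1 + (rest.count a : Int) + (L1.count acc : Int) with hv0
    have hL2len : L2.length ≤ n := by
      have h1 : L2.length ≤ L1.length := List.Sublist.length_le List.filter_sublist
      have h2 : L1.length ≤ rest.length := List.Sublist.length_le List.filter_sublist
      simp only [List.length_cons] at hn; omega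
    have hsL2 : L2.Pairwise (· ≤ ·) := List.Pairwise.sublist List.filter_sublist hsL1
    have hif : (if v > ff then v else ff) = max ff v := by
      rw [max_def]; split_ifs <;> omega
    rw [hif, ih L2 hL2len hsL2 (max ff v)]
    have hv : v = pvF (a :: rest) a := by
      by_cases haa : pvRev a = a
      · have hz : L1.count acc = 0 := by
          rw [hL1, hacc, haa]
          exact List.count_eq_zero.mpr (by simp)
        rw [hv0, hz, pvF, if_pos haa, List.count_cons_self]
        push_cast; ring
      · have hacc_ne : acc ≠ a := haa
        have h1 : L1.count acc = rest.count acc := by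
          rw [hL1]; exact List.count_filter (by simp [hacc_ne])
        rw [hv0, h1, pvF, if_neg haa, List.count_cons_self, hacc,
          List.count_cons_of_ne (fun he => hacc_ne (hacc.trans he.symm))]
        push_cast; ring
    have hcnt : ∀ t : String, t ≠ a → t ≠ acc → L2.count t = (a :: rest).count t := by
      intro t ht1 ht2
      rw [hL2, List.count_filter (by simp [ht2]), hL1, List.count_filter (by simp [ht1])]
      exact (List.count_cons_of_ne (Ne.symm ht1)).symm
    have hFeq : ∀ s ∈ L2, pvF L2 s = pvF (a :: rest) s := by
      intro s hsm
      have hm1 := List.mem_filter.mp hsm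
      have hm2 := List.mem_filter.mp hm1.1
      have hs_a : s ≠ a := by simpa using hm2.2
      have hs_acc : s ≠ acc := by simpa using hm1.2
      have hrev_a : pvRev s ≠ a := by
        intro he
        exact hs_acc (by rw [hacc, ← he]; exact (pvRev_pvRev s).symm)
      have hrev_acc : pvRev s ≠ acc := by
        intro he; rw [hacc] at he; exact hs_a (pvRev_inj he)
      unfold pvF
      by_cases hpal : pvRev s = s
      · rw [if_pos hpal, if_pos hpal, hcnt s hs_a hs_acc]
      · rw [if_neg hpal, if_neg hpal, hcnt s hs_a hs_acc, hcnt (pvRev s) hrev_a hrev_acc]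
    rw [pvMx_congr hFeq, hv]
    have A := le_pvMx (pvF (a :: rest)) (max ff (pvF (a :: rest) a)) L2
    have B := le_pvMx (pvF (a :: rest)) ff (a :: rest)
    have hmemL2 : ∀ s ∈ L2, s ∈ a :: rest := fun s hs2 =>
      List.mem_cons_of_mem a (List.mem_filter.mp (List.mem_filter.mp hs2).1).1
    apply le_antisymm
    · exact pvMx_le (max_le B.1 (B.2 a List.mem_cons_self))
        (fun s hs2 => B.2 s (hmemL2 s hs2))
    · refine pvMx_le (le_trans (le_max_left ff _) A.1) ?_
      intro s hsm
      rcases List.mem_cons.mp hsm with rfl | hsr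
      · exact le_trans (le_max_right ff _) A.1
      · by_cases hs1 : s = a
        · subst hs1; exact le_trans (le_max_right ff _) A.1
        · by_cases hs2 : s = acc
          · subst hs2
            rw [hacc, pvF_rev]
            exact le_trans (le_max_right ff _) A.1
          · have hmem2 : s ∈ L2 := by
              rw [hL2, hL1]
              exact List.mem_filter.mpr ⟨List.mem_filter.mpr ⟨hsr, by simp [hs1]⟩, by simp [hs2]⟩
            exact A.2 s hmem2

-- ===== VERDICT (by name: the statement is the Claim_ definition above) =====
theorem strong_string_spec : Claim_equal_strong_string := by
  unfold Claim_equal_strong_string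
  intro T _
  unfold Spec_strong_string strong_string strong_string_alt
  by_cases hT : T.length = 0
  · rw [if_pos hT, if_pos hT]
  · rw [if_neg hT, if_neg hT]
    have hperm := pvMergeSort_perm T
    have hsort := pvMergeSort_sorted T
    rw [pvOuterLoopF_spec T.length (pvMergeSort T) (by rw [hperm.length_eq]) hsort 1]
    have hA1 : pvMx (pvF (pvMergeSort T)) 1 (pvMergeSort T) = pvMx (pvF T) 1 (pvMergeSort T) :=
      pvMx_congr (fun s _ => by unfold pvF; rw [hperm.count_eq, hperm.count_eq])
    rw [hA1, pvMx_eq_of_mem_iff (l₂ := PySem.Set.ofList T)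
      (fun s => by rw [hperm.mem_iff, PySem.Set.mem_ofList])]
    rw [PySem.Dict.foldl_insert_getD_add_one_eq_counter]
    dsimp only
    rw [PySem.Dict.items_counter, List.foldl_map]
    unfold pvMx
    refine (List.foldl_ext _ _ 1 ?_).symm
    intro b k _
    simp only [PySem.Dict.getD_counter, pvF]
    by_cases hk : pvRev k = k
    · rw [max_def]; split_ifs <;> omega
    · rw [max_def]; split_ifs <;> omega
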